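-- pv_equiv track=rewrite | github.com/fabirino/TI_TP2 | Trabalho.py | calcula_ocorrencias
-- ===== SOURCE A (Python) =====
-- def calcula_ocorrencias(P, alfabeto):
--     dic = {}
--     ocorrencias = []
--     for i in alfabeto:
--         dic.setdefault(i, 0)
--     for i in P:
--         if(i in dic.keys()):
--             dic[i] += 1
--     for v in dic.values():
--         ocorrencias.append(v)
--     return ocorrencias
-- ===== SOURCE B (Python) =====
-- def calcula_ocorrencias(P, alfabeto):
--     chars = list(P)
--     vistos = []
--     for s in alfabeto:
--         if s not in vistos:
--             vistos.append(s)
--     return [chars.count(s) for s in vistos]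
-- ===== Notes on version B (the rewrite author's own statement) =====
-- stated objective: simpler
-- what changed: B drops the dict entirely: it deduplicates alfabeto with a seen-list and answers each symbol by a direct chars.count scan of P, instead of A's setdefault-initialised dict updated by a membership-filtered counting pass and read back via values().
import Mathlib
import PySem

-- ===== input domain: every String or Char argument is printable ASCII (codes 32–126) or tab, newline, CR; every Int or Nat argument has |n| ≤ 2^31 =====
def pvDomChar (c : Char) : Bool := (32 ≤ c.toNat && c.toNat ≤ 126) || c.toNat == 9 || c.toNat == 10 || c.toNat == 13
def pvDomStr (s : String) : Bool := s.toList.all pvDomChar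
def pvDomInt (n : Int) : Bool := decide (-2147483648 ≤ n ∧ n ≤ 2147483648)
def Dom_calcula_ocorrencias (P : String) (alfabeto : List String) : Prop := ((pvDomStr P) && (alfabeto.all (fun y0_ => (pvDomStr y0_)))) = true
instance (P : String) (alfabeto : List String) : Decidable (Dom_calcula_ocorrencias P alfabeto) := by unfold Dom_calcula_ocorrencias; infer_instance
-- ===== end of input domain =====

-- B drops the dict: it dedups the alphabet with a seen-list and answers each symbol
-- by a direct count scan over P's characters (simpler; no hash table at all).

-- ===== PORT A =====
def calcula_ocorrencias (P : String) (alfabeto : List String) : List Int :=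
  -- dic = {}; for i in alfabeto: dic.setdefault(i, 0)
  let dic : PySem.Dict String Int :=
    alfabeto.foldl (fun d i => d.setdefault i 0) PySem.Dict.empty
  -- for i in P: if i in dic.keys(): dic[i] += 1    (i is the 1-char string String.ofList [c])
  let dic :=
    P.toList.foldl
      (fun d c =>
        if d.contains (String.ofList [c]) then d.modify (String.ofList [c]) 0 (· + 1) else d) dic
  -- ocorrencias = []; for v in dic.values(): ocorrencias.append(v)
  dic.values

-- ===== PORT B =====
def calcula_ocorrencias_alt (P : String) (alfabeto : List String) : List Int :=
  -- chars = list(P)    (each character as a 1-char string)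
  let chars := P.toList.map (fun c => String.ofList [c])
  -- vistos = []; for s in alfabeto: if s not in vistos: vistos.append(s)
  let vistos : PySem.Set String := alfabeto.foldl (fun v s => PySem.Set.add v s) PySem.Set.empty
  -- [chars.count(s) for s in vistos]
  vistos.map (fun s => (PySem.List.count chars s : Int))

-- ===== PRECONDITION & SPEC =====
def Spec_calcula_ocorrencias (P : String) (alfabeto : List String) (out : List Int) : Prop := out = calcula_ocorrencias_alt P alfabeto
instance (P : String) (alfabeto : List String) (out : List Int) : Decidable (Spec_calcula_ocorrencias P alfabeto out) := by unfold Spec_calcula_ocorrencias; infer_instance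

-- ===== CLAIM =====
def Claim_equal_calcula_ocorrencias : Prop := ∀ (P : String) (alfabeto : List String), Dom_calcula_ocorrencias P alfabeto → Spec_calcula_ocorrencias P alfabeto (calcula_ocorrencias P alfabeto)

-- ===== LEMMAS AND PROOFS =====

-- A's setdefault loop: its keys are Set.update of the old keys by alfabeto.
theorem setdefault_fold_keys (l : List String) (d : PySem.Dict String Int) :
    (l.foldl (fun d i => d.setdefault i 0) d).keys = PySem.Set.update d.keys l := by
  induction l generalizing d with
  | nil => simp [PySem.Set.update_nil]
  | cons x xs ih =>
      simp only [List.foldl_cons, ih, PySem.Set.update_cons]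
      by_cases h : d.contains x = true
      · rw [PySem.Dict.setdefault_of_contains d 0 h, PySem.Set.add_of_mem
          ((PySem.Dict.contains_iff_mem_keys d x).mp h)]
      · rw [PySem.Dict.setdefault_of_not_contains d 0 (by simpa using h),
            PySem.Dict.keys_insert_of_not_contains d 0 (by simpa using h),
            PySem.Set.add_of_not_mem]
        exact fun hm => h ((PySem.Dict.contains_iff_mem_keys d x).mpr hm)

-- A's setdefault loop never changes a getD-with-default-0 lookup (new keys get value 0).
theorem setdefault_fold_getD (l : List String) (d : PySem.Dict String Int) (k : String) :
    (l.foldl (fun d i => d.setdefault i 0) d).getD k 0 = d.getD k 0 := by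
  induction l generalizing d with
  | nil => rfl
  | cons x xs ih =>
      simp only [List.foldl_cons, ih]
      by_cases h : d.contains x = true
      · rw [PySem.Dict.setdefault_of_contains d 0 h]
      · rw [PySem.Dict.setdefault_of_not_contains d 0 (by simpa using h),
            PySem.Dict.getD_insert]
        split_ifs with he
        · subst he; exact (PySem.Dict.getD_of_not_contains d 0 (by simpa using h)).symm
        · rfl

-- A's counting loop keeps the key list unchanged.
theorem countfold_keys (l : List Char) (d : PySem.Dict String Int) :
    (l.foldl (fun d c =>
        if d.contains (String.ofList [c]) then d.modify (String.ofList [c]) 0 (· + 1) else d)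
      d).keys = d.keys := by
  induction l generalizing d with
  | nil => rfl
  | cons c cs ih =>
      simp only [List.foldl_cons]
      by_cases h : d.contains (String.ofList [c]) = true
      · rw [if_pos h, ih, PySem.Dict.keys_modify, PySem.Dict.keys_insert_of_contains d _ h]
      · rw [if_neg h, ih]

-- A's counting loop adds, at a key already present, the number of its occurrences among P's characters.
theorem countfold_getD (l : List Char) (d : PySem.Dict String Int) (k : String)
    (hk : d.contains k = true) :
    (l.foldl (fun d c =>
        if d.contains (String.ofList [c]) then d.modify (String.ofList [c]) 0 (· + 1) else d)
      d).getD k 0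
      = d.getD k 0 + ((l.map (fun c => String.ofList [c])).count k : Int) := by
  induction l generalizing d with
  | nil => simp
  | cons c cs ih =>
      simp only [List.foldl_cons, List.map_cons, List.count_cons]
      by_cases h : d.contains (String.ofList [c]) = true
      · rw [if_pos h, ih _ (by rw [PySem.Dict.contains_modify]; simp [hk]),
            PySem.Dict.getD_modify]
        by_cases he : k = String.ofList [c]
        · subst he; simp; ring
        · simp [he, Ne.symm he]
      · rw [if_neg h, ih _ hk]
        have hne : ¬ (String.ofList [c] == k) = true := by
          intro hb
          rw [eq_of_beq hb] at h
          exact h hk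
        simp [hne]

-- ===== VERDICT =====
theorem calcula_ocorrencias_spec : Claim_equal_calcula_ocorrencias := by
  intro P alfabeto _
  unfold Spec_calcula_ocorrencias calcula_ocorrencias calcula_ocorrencias_alt
  set d0 : PySem.Dict String Int :=
    alfabeto.foldl (fun d i => d.setdefault i 0) PySem.Dict.empty with hd0
  set d1 := P.toList.foldl
      (fun d c =>
        if d.contains (String.ofList [c]) then d.modify (String.ofList [c]) 0 (· + 1) else d)
      d0 with hd1
  have hvistos : (alfabeto.foldl (fun v s => PySem.Set.add v s) PySem.Set.empty : PySem.Set String)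
      = PySem.Set.ofList alfabeto := rfl
  have hkeys0 : d0.keys = PySem.Set.ofList alfabeto := by
    rw [hd0, setdefault_fold_keys]
    simp [PySem.Dict.keys_empty, PySem.Set.update_nil_left]
  have hkeys1 : d1.keys = PySem.Set.ofList alfabeto := by
    rw [hd1, countfold_keys, hkeys0]
  have hnodup : d1.keys.Nodup := by
    rw [hkeys1]; exact PySem.Set.nodup_ofList alfabeto
  rw [hvistos, PySem.Dict.values_eq_map_keys d1 hnodup 0, hkeys1]
  apply List.map_congr_left
  intro k hk
  have hk0 : d0.contains k = true := by
    rw [PySem.Dict.contains_iff_mem_keys, hkeys0]; exact hk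
  rw [hd1, countfold_getD _ _ _ hk0, hd0, setdefault_fold_getD,
      PySem.List.count_eq]
  simp [PySem.Dict.getD_empty]
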